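-- pv_equiv track=rewrite | github.com/AirupCodingtest/Algorithm_Study | CodingTest/Week 2/Lv0. 수 조작하기 2.py | solution
-- ===== SOURCE A (Python) =====
-- def solution(numLog):
--     answer = ""
--     a = len(numLog)
--     i = 1
--     while(a>i):
--         if(numLog[i] - numLog[i-1] == 1):
--             answer+="w"
--         elif(numLog[i] - numLog[i-1] == -1):
--             answer+="s"
--         elif(numLog[i] - numLog[i-1] == 10):
--             answer+="d"
--         else:
--             answer+="a"
--         i+=1
--
--     return answer
-- ===== SOURCE B (Python) =====
-- def solution(numLog):
--     # consume the list from the right with a stack, emit chars back-to-front,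
--     # then reverse once at the end
--     xs = list(numLog)
--     parts = []
--     while len(xs) >= 2:
--         d = xs[-1] - xs[-2]
--         parts.append("w" if d == 1 else "s" if d == -1 else "d" if d == 10 else "a")
--         xs.pop()
--     parts.reverse()
--     return "".join(parts)
-- ===== Notes on version B (the rewrite author's own statement) =====
-- stated objective: alternative
-- what changed: Replaces A's forward index-walking while loop with quadratic string concatenation by a right-to-left pass that pops the last element off a working copy, pushes one character per step onto a stack, and reverses the stack once before a single join.
import Mathlib
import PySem

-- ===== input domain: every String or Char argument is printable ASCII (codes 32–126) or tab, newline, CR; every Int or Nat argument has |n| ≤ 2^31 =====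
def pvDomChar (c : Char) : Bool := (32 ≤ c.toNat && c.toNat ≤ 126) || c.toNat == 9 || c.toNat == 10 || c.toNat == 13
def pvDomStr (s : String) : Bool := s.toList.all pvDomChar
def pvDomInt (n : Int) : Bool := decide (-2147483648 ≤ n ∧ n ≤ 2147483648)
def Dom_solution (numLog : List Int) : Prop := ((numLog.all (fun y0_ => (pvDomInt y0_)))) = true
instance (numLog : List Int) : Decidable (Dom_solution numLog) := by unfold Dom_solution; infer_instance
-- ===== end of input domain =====

-- B traverses right-to-left with a stack and reverses once at the end; no behaviour change is intended.

-- ===== PORT A =====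
-- A's while loop: i walks forward from 1 while a > i, appending one char per step
def solutionGo (numLog : List Int) (a : Nat) (i : Nat) (answer : List Char) : List Char :=
  if a > i then
    let c : Char :=
      if numLog.getD i 0 - numLog.getD (i - 1) 0 = 1 then 'w'
      else if numLog.getD i 0 - numLog.getD (i - 1) 0 = -1 then 's'
      else if numLog.getD i 0 - numLog.getD (i - 1) 0 = 10 then 'd'
      else 'a'
    solutionGo numLog a (i + 1) (answer ++ [c])
  else answer
termination_by a - i

def solution (numLog : List Int) : String :=
  String.ofList (solutionGo numLog numLog.length 1 [])

-- ===== PORT B =====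
-- B's while loop: pops the last element of xs, pushing one char per step onto parts
def solutionAltGo (xs : List Int) (parts : List Char) : List Char :=
  if _h : 2 ≤ xs.length then
    let d := (PySem.List.pyGet? xs (-1)).getD 0 - (PySem.List.pyGet? xs (-2)).getD 0
    let c : Char := if d = 1 then 'w' else if d = -1 then 's' else if d = 10 then 'd' else 'a'
    solutionAltGo xs.dropLast (parts ++ [c])
  else parts
termination_by xs.length
decreasing_by simp [List.length_dropLast]; omega

def solution_alt (numLog : List Int) : String :=
  String.ofList (solutionAltGo numLog []).reverse

-- ===== PRECONDITION & SPEC =====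
def Spec_solution (numLog : List Int) (out : String) : Prop := out = solution_alt numLog
instance (numLog : List Int) (out : String) : Decidable (Spec_solution numLog out) := by unfold Spec_solution; infer_instance

-- ===== CLAIM (what is proved, stated in full; the proofs are below) =====
def Claim_equal_solution : Prop := ∀ (numLog : List Int), Dom_solution numLog → Spec_solution numLog (solution numLog)

-- ===== LEMMAS AND PROOFS =====

-- the step character for a difference (the shared if-chain)
def stepChar (d : Int) : Char :=
  if d = 1 then 'w' else if d = -1 then 's' else if d = 10 then 'd' else 'a'

-- the common intermediate: map stepChar over consecutive differences, front-to-back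
def pm : List Int → List Char
  | a :: b :: t => stepChar (b - a) :: pm (b :: t)
  | _ => []

lemma pm_concat : ∀ (a : Int) (t : List Int) (b : Int),
    pm ((a :: t) ++ [b])
      = pm (a :: t) ++ [stepChar (b - (a :: t).getLast (List.cons_ne_nil a t))]
  | a, [], b => by simp [pm, List.getLast]
  | a, c :: t', b => by
    have ih := pm_concat c t' b
    simp only [List.cons_append, pm] at ih ⊢
    rw [ih, List.getLast_cons (List.cons_ne_nil c t')]

-- A's loop from index i produces pm of the remaining suffix
lemma go_eq (numLog : List Int) :
    ∀ (i : Nat) (answer : List Char), 1 ≤ i →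
      solutionGo numLog numLog.length i answer = answer ++ pm (numLog.drop (i - 1)) := by
  intro i answer hi
  by_cases h : numLog.length > i
  · rw [solutionGo]
    simp only [h, if_pos]
    rw [go_eq numLog (i + 1) _ (by omega)]
    have hi1 : i - 1 < numLog.length := by omega
    have hii : i - 1 + 1 = i := by omega
    have hdrop : numLog.drop (i - 1) = numLog[i - 1] :: numLog.drop i := by
      rw [List.drop_eq_getElem_cons hi1, hii]
    have hdrop2 : numLog.drop i = numLog[i] :: numLog.drop (i + 1) :=
      List.drop_eq_getElem_cons h
    have hg1 : numLog.getD i 0 = numLog[i] := by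
      simp [List.getD_eq_getElem?_getD, List.getElem?_eq_getElem h]
    have hg2 : numLog.getD (i - 1) 0 = numLog[i - 1] := by
      simp [List.getD_eq_getElem?_getD, List.getElem?_eq_getElem hi1]
    simp only [Nat.add_sub_cancel]
    rw [hdrop, hdrop2, pm, hg1, hg2]
    simp [stepChar]
  · rw [solutionGo]
    simp only [h, if_neg, not_false_iff]
    have hnil : numLog.drop i = [] := List.drop_eq_nil_of_le (by omega)
    have hii : i - 1 + 1 = i := by omega
    have htail : (numLog.drop (i - 1)).tail = numLog.drop i := by
      rw [List.tail_drop, hii]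
    rcases hd : numLog.drop (i - 1) with _ | ⟨x, rest⟩
    · simp [pm]
    · have hrest : rest = [] := by
        rw [hd] at htail; simp only [List.tail_cons] at htail; rw [htail, hnil]
      subst hrest; simp [pm]
termination_by i => numLog.length - i
decreasing_by omega

-- B's loop produces pm reversed, on top of parts
lemma altGo_eq (xs : List Int) : ∀ (parts : List Char),
    solutionAltGo xs parts = parts ++ (pm xs).reverse := by
  induction xs using List.reverseRecOn with
  | nil => intro parts; rw [solutionAltGo]; simp [pm]
  | append_singleton ys b ih =>
    intro parts
    rw [solutionAltGo]
    rcases ys with _ | ⟨a, t⟩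
    · simp [pm]
    · have hlen : 2 ≤ ((a :: t) ++ [b]).length := by simp
      simp only [hlen, dif_pos]
      rw [List.dropLast_concat, ih]
      rw [pm_concat a t b]
      have h1 : PySem.List.pyGet? ((a :: t) ++ [b]) (-1) = some b :=
        PySem.List.pyGet?_neg_one_append_singleton _ _
      have h2 : PySem.List.pyGet? ((a :: t) ++ [b]) (-2)
          = some ((a :: t).getLast (List.cons_ne_nil a t)) := by
        rw [PySem.List.pyGet?_neg_ofNat _ 2 (by omega) (by simp)]
        have hl2 : ((a :: t) ++ [b]).length - 2 = t.length := by simp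
        have hlt : t.length < ((a :: t) ++ [b]).length := by simp
        rw [hl2, List.getElem?_eq_getElem hlt]
        have hleft : ((a :: t) ++ [b])[t.length]'hlt = (a :: t)[t.length]'(by simp) :=
          List.getElem_append_left (by simp)
        rw [hleft, List.getLast_eq_getElem]
        rfl
      rw [h1, h2]
      simp [stepChar]
      rfl

-- ===== VERDICT (by name: the statement is the Claim_ definition above) =====
theorem solution_spec : Claim_equal_solution := by
  intro numLog _
  unfold Spec_solution solution solution_alt
  rw [go_eq numLog 1 [] (le_refl 1), altGo_eq numLog []]
  simp
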